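-- pv_equiv track=rewrite | github.com/WildeSR98/555 | web/api/scan_api.py | resolve_next_status
-- ===== SOURCE A (Python) =====
-- _STAGE_NEXT = {
--     # комплетед этап → следующий WAITING
--     'PRE_PRODUCTION':    'WAITING_ASSEMBLY',
--     'KITTING':           'WAITING_ASSEMBLY',
--     'ASSEMBLY':          'WAITING_VIBROSTAND',
--     'VIBROSTAND':        'WAITING_TECH_CONTROL_1_1',
--     'TECH_CONTROL_1_1':  'WAITING_TECH_CONTROL_1_2',
--     'TECH_CONTROL_1_2':  'WAITING_FUNC_CONTROL',
--     'FUNC_CONTROL':      'WAITING_TECH_CONTROL_2_1',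
--     'TECH_CONTROL_2_1':  'WAITING_TECH_CONTROL_2_2',
--     'TECH_CONTROL_2_2':  'WAITING_PACKING',
--     'PACKING':           'WAITING_ACCOUNTING',
--     'ACCOUNTING':        'WAITING_WAREHOUSE',
--     'WAREHOUSE':         'QC_PASSED',
-- }
--
-- def resolve_next_status(current_status: str, enabled_stages: list) -> str:
--     """
--     Берёт следующий статус с учётом активных этапов маршрута.
--     Если следующий этап отключён — пропускает его и ищет дальше.
--     """
--     if not enabled_stages:   # Дефолтный маршрут — все этапы активны
--         return _STAGE_NEXT.get(current_status, 'QC_PASSED')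
--
--     candidate = _STAGE_NEXT.get(current_status, 'QC_PASSED')
--     for _ in range(15):  # защита от бесконечного цикла
--         if not candidate or not candidate.startswith('WAITING_'):
--             return candidate  # QC_PASSED или терминальный статус
--         stage = candidate[len('WAITING_'):]  # WAITING_VIBROSTAND → VIBROSTAND
--         if stage in enabled_stages:
--             return candidate  # этап активен
--         # Этап отключён — пропускаем: находим что идёт после этого этапа
--         candidate = _STAGE_NEXT.get(stage, 'QC_PASSED')
--     return candidate
-- ===== SOURCE B (Python) =====
-- _STAGE_NEXT = {
--     'PRE_PRODUCTION':    'WAITING_ASSEMBLY',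
--     'KITTING':           'WAITING_ASSEMBLY',
--     'ASSEMBLY':          'WAITING_VIBROSTAND',
--     'VIBROSTAND':        'WAITING_TECH_CONTROL_1_1',
--     'TECH_CONTROL_1_1':  'WAITING_TECH_CONTROL_1_2',
--     'TECH_CONTROL_1_2':  'WAITING_FUNC_CONTROL',
--     'FUNC_CONTROL':      'WAITING_TECH_CONTROL_2_1',
--     'TECH_CONTROL_2_1':  'WAITING_TECH_CONTROL_2_2',
--     'TECH_CONTROL_2_2':  'WAITING_PACKING',
--     'PACKING':           'WAITING_ACCOUNTING',
--     'ACCOUNTING':        'WAITING_WAREHOUSE',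
--     'WAREHOUSE':         'QC_PASSED',
-- }
--
-- ORDERED_STAGES = ['ASSEMBLY', 'VIBROSTAND', 'TECH_CONTROL_1_1', 'TECH_CONTROL_1_2',
--                   'FUNC_CONTROL', 'TECH_CONTROL_2_1', 'TECH_CONTROL_2_2', 'PACKING',
--                   'ACCOUNTING', 'WAREHOUSE']
--
-- def resolve_next_status(current_status: str, enabled_stages: list) -> str:
--     candidate = _STAGE_NEXT.get(current_status, 'QC_PASSED')
--     if not enabled_stages:
--         return candidate
--     if not candidate or not candidate.startswith('WAITING_'):
--         return candidate
--     stage = candidate[len('WAITING_'):]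
--     started = False
--     for s in ORDERED_STAGES:
--         started = started or s == stage
--         if started and s in enabled_stages:
--             return 'WAITING_' + s
--     return 'QC_PASSED'
-- ===== Notes on version B (the rewrite author's own statement) =====
-- stated objective: alternative
-- what changed: Instead of chaining repeated _STAGE_NEXT dict lookups inside a fuel-guarded while-style loop, B makes a single linear scan of an explicit ordered stage list with a 'started' flag, returning WAITING_<s> for the first enabled stage at or after the candidate's stage (dict is consulted exactly once, no fuel counter needed).
import Mathlib
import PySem

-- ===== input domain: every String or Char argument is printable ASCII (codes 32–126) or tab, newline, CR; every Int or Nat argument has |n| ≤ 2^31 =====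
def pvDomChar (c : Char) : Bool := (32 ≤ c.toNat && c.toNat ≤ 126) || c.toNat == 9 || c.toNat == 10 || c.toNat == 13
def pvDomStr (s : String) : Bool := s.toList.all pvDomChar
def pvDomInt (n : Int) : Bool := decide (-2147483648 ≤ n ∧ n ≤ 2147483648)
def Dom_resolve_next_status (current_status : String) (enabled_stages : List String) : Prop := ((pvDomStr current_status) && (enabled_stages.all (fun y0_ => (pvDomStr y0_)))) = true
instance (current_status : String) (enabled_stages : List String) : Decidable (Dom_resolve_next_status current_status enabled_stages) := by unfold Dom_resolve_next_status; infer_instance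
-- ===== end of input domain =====

-- B replaces A's fuel-guarded dict-chaining loop by one linear scan of an explicit ordered
-- stage list with a started flag (alternative decomposition; same observable result).

-- ===== PORT A =====
-- the module constant _STAGE_NEXT (shared context of both Pythons)
def stageNext : PySem.Dict String String := PySem.Dict.mk
  [("PRE_PRODUCTION", "WAITING_ASSEMBLY"),
   ("KITTING", "WAITING_ASSEMBLY"),
   ("ASSEMBLY", "WAITING_VIBROSTAND"),
   ("VIBROSTAND", "WAITING_TECH_CONTROL_1_1"),
   ("TECH_CONTROL_1_1", "WAITING_TECH_CONTROL_1_2"),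
   ("TECH_CONTROL_1_2", "WAITING_FUNC_CONTROL"),
   ("FUNC_CONTROL", "WAITING_TECH_CONTROL_2_1"),
   ("TECH_CONTROL_2_1", "WAITING_TECH_CONTROL_2_2"),
   ("TECH_CONTROL_2_2", "WAITING_PACKING"),
   ("PACKING", "WAITING_ACCOUNTING"),
   ("ACCOUNTING", "WAITING_WAREHOUSE"),
   ("WAREHOUSE", "QC_PASSED")]

-- A's 'for _ in range(15)' loop, fuel-recursive over the same state (candidate)
def resolveLoop : Nat → String → List String → String
  | 0, cand, _ => cand
  | n+1, cand, enabled =>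
    if (cand == "") || !(PySem.Str.startswith cand "WAITING_") then cand
    else
      let stage := PySem.Str.slice cand (some (PySem.Str.len "WAITING_")) none
      if enabled.contains stage then cand
      else resolveLoop n (PySem.Dict.getD stageNext stage "QC_PASSED") enabled

def resolve_next_status (current_status : String) (enabled_stages : List String) : String :=
  if enabled_stages = [] then PySem.Dict.getD stageNext current_status "QC_PASSED"
  else resolveLoop 15 (PySem.Dict.getD stageNext current_status "QC_PASSED") enabled_stages

-- ===== PORT B =====
def orderedStages : List String :=
  ["ASSEMBLY", "VIBROSTAND", "TECH_CONTROL_1_1", "TECH_CONTROL_1_2",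
   "FUNC_CONTROL", "TECH_CONTROL_2_1", "TECH_CONTROL_2_2", "PACKING",
   "ACCOUNTING", "WAREHOUSE"]

-- Source B's 'for s in ORDERED_STAGES' loop with the started flag
def scanStages : List String → Bool → String → List String → String
  | [], _, _, _ => "QC_PASSED"
  | s :: rest, started, stage, enabled =>
    let started' := started || (s == stage)
    if started' && enabled.contains s then "WAITING_" ++ s
    else scanStages rest started' stage enabled

def resolve_next_status_alt (current_status : String) (enabled_stages : List String) : String :=
  let candidate := PySem.Dict.getD stageNext current_status "QC_PASSED"
  if enabled_stages = [] then candidate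
  else if (candidate == "") || !(PySem.Str.startswith candidate "WAITING_") then candidate
  else scanStages orderedStages false (PySem.Str.slice candidate (some (PySem.Str.len "WAITING_")) none) enabled_stages

-- ===== PRECONDITION & SPEC =====
def Spec_resolve_next_status (current_status : String) (enabled_stages : List String) (out : String) : Prop := out = resolve_next_status_alt current_status enabled_stages
instance (current_status : String) (enabled_stages : List String) (out : String) : Decidable (Spec_resolve_next_status current_status enabled_stages out) := by unfold Spec_resolve_next_status; infer_instance

-- ===== CLAIM (what is proved, stated in full; the proofs are below) =====
def Claim_equal_resolve_next_status : Prop := ∀ (current_status : String) (enabled_stages : List String), Dom_resolve_next_status current_status enabled_stages → Spec_resolve_next_status current_status enabled_stages (resolve_next_status current_status enabled_stages)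

-- ===== LEMMAS AND PROOFS =====

-- common value of both programs once the scan has started at a given suffix of the stage list
def firstEnabled : List String → List String → String
  | [], _ => "QC_PASSED"
  | s :: rest, e => if e.contains s then "WAITING_" ++ s else firstEnabled rest e

lemma loop_qc (n : Nat) (e : List String) : resolveLoop n "QC_PASSED" e = "QC_PASSED" := by
  cases n with
  | zero => rfl
  | succ n => simp only [resolveLoop]; exact if_pos (by decide)

lemma scan_true (l : List String) (st : String) (e : List String) :
    scanStages l true st e = firstEnabled l e := by
  induction l with
  | nil => rfl
  | cons s rest ih => simp [scanStages, firstEnabled, ih]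

lemma scan_skip (s : String) (rest : List String) (st : String) (e : List String)
    (h : (s == st) = false) :
    scanStages (s :: rest) false st e = scanStages rest false st e := by
  simp [scanStages, h]

lemma scan_hit (s : String) (rest : List String) (e : List String) :
    scanStages (s :: rest) false s e =
      if e.contains s then "WAITING_" ++ s else firstEnabled rest e := by
  simp [scanStages, scan_true]

lemma loopA_step (e : List String) (n : Nat) (cand st nxt : String)
    (h1 : ((cand == "") || !(PySem.Str.startswith cand "WAITING_")) = false)
    (h2 : PySem.Str.slice cand (some (PySem.Str.len "WAITING_")) none = st)
    (h3 : PySem.Dict.getD stageNext st "QC_PASSED" = nxt) :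
    resolveLoop (n+1) cand e = if e.contains st then cand else resolveLoop n nxt e := by
  simp only [resolveLoop]
  rw [h1, h2, h3]
  simp only [Bool.false_eq_true, if_false]

lemma loopA_9 (e : List String) (n : Nat) :
    resolveLoop (n+1) "WAITING_WAREHOUSE" e = firstEnabled ["WAREHOUSE"] e := by
  rw [loopA_step e n _ "WAREHOUSE" "QC_PASSED" (by decide) (by decide) (by decide)]
  by_cases h : "WAREHOUSE" ∈ e <;> simp [firstEnabled, h, loop_qc]

lemma loopA_8 (e : List String) (n : Nat) :
    resolveLoop (n+2) "WAITING_ACCOUNTING" e = firstEnabled ["ACCOUNTING", "WAREHOUSE"] e := by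
  rw [loopA_step e (n+1) _ "ACCOUNTING" "WAITING_WAREHOUSE" (by decide) (by decide) (by decide),
      loopA_9]
  by_cases h : "ACCOUNTING" ∈ e <;> simp [firstEnabled, h]

lemma loopA_7 (e : List String) (n : Nat) :
    resolveLoop (n+3) "WAITING_PACKING" e = firstEnabled ["PACKING", "ACCOUNTING", "WAREHOUSE"] e := by
  rw [loopA_step e (n+2) _ "PACKING" "WAITING_ACCOUNTING" (by decide) (by decide) (by decide),
      loopA_8]
  by_cases h : "PACKING" ∈ e <;> simp [firstEnabled, h]

lemma loopA_6 (e : List String) (n : Nat) :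
    resolveLoop (n+4) "WAITING_TECH_CONTROL_2_2" e =
      firstEnabled ["TECH_CONTROL_2_2", "PACKING", "ACCOUNTING", "WAREHOUSE"] e := by
  rw [loopA_step e (n+3) _ "TECH_CONTROL_2_2" "WAITING_PACKING" (by decide) (by decide) (by decide),
      loopA_7]
  by_cases h : "TECH_CONTROL_2_2" ∈ e <;> simp [firstEnabled, h]

lemma loopA_5 (e : List String) (n : Nat) :
    resolveLoop (n+5) "WAITING_TECH_CONTROL_2_1" e =
      firstEnabled ["TECH_CONTROL_2_1", "TECH_CONTROL_2_2", "PACKING", "ACCOUNTING", "WAREHOUSE"] e := by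
  rw [loopA_step e (n+4) _ "TECH_CONTROL_2_1" "WAITING_TECH_CONTROL_2_2" (by decide) (by decide) (by decide),
      loopA_6]
  by_cases h : "TECH_CONTROL_2_1" ∈ e <;> simp [firstEnabled, h]

lemma loopA_4 (e : List String) (n : Nat) :
    resolveLoop (n+6) "WAITING_FUNC_CONTROL" e =
      firstEnabled ["FUNC_CONTROL", "TECH_CONTROL_2_1", "TECH_CONTROL_2_2", "PACKING", "ACCOUNTING", "WAREHOUSE"] e := by
  rw [loopA_step e (n+5) _ "FUNC_CONTROL" "WAITING_TECH_CONTROL_2_1" (by decide) (by decide) (by decide),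
      loopA_5]
  by_cases h : "FUNC_CONTROL" ∈ e <;> simp [firstEnabled, h]

lemma loopA_3 (e : List String) (n : Nat) :
    resolveLoop (n+7) "WAITING_TECH_CONTROL_1_2" e =
      firstEnabled ["TECH_CONTROL_1_2", "FUNC_CONTROL", "TECH_CONTROL_2_1", "TECH_CONTROL_2_2", "PACKING", "ACCOUNTING", "WAREHOUSE"] e := by
  rw [loopA_step e (n+6) _ "TECH_CONTROL_1_2" "WAITING_FUNC_CONTROL" (by decide) (by decide) (by decide),
      loopA_4]
  by_cases h : "TECH_CONTROL_1_2" ∈ e <;> simp [firstEnabled, h]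

lemma loopA_2 (e : List String) (n : Nat) :
    resolveLoop (n+8) "WAITING_TECH_CONTROL_1_1" e =
      firstEnabled ["TECH_CONTROL_1_1", "TECH_CONTROL_1_2", "FUNC_CONTROL", "TECH_CONTROL_2_1", "TECH_CONTROL_2_2", "PACKING", "ACCOUNTING", "WAREHOUSE"] e := by
  rw [loopA_step e (n+7) _ "TECH_CONTROL_1_1" "WAITING_TECH_CONTROL_1_2" (by decide) (by decide) (by decide),
      loopA_3]
  by_cases h : "TECH_CONTROL_1_1" ∈ e <;> simp [firstEnabled, h]

lemma loopA_1 (e : List String) (n : Nat) :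
    resolveLoop (n+9) "WAITING_VIBROSTAND" e =
      firstEnabled ["VIBROSTAND", "TECH_CONTROL_1_1", "TECH_CONTROL_1_2", "FUNC_CONTROL", "TECH_CONTROL_2_1", "TECH_CONTROL_2_2", "PACKING", "ACCOUNTING", "WAREHOUSE"] e := by
  rw [loopA_step e (n+8) _ "VIBROSTAND" "WAITING_TECH_CONTROL_1_1" (by decide) (by decide) (by decide),
      loopA_2]
  by_cases h : "VIBROSTAND" ∈ e <;> simp [firstEnabled, h]

lemma loopA_0 (e : List String) (n : Nat) :
    resolveLoop (n+10) "WAITING_ASSEMBLY" e = firstEnabled orderedStages e := by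
  rw [loopA_step e (n+9) _ "ASSEMBLY" "WAITING_VIBROSTAND" (by decide) (by decide) (by decide),
      loopA_1]
  by_cases h : "ASSEMBLY" ∈ e <;> simp [orderedStages, firstEnabled, h]

lemma getNext_cases (cs : String) :
    PySem.Dict.getD stageNext cs "QC_PASSED" = "WAITING_ASSEMBLY" ∨
    PySem.Dict.getD stageNext cs "QC_PASSED" = "WAITING_VIBROSTAND" ∨
    PySem.Dict.getD stageNext cs "QC_PASSED" = "WAITING_TECH_CONTROL_1_1" ∨
    PySem.Dict.getD stageNext cs "QC_PASSED" = "WAITING_TECH_CONTROL_1_2" ∨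
    PySem.Dict.getD stageNext cs "QC_PASSED" = "WAITING_FUNC_CONTROL" ∨
    PySem.Dict.getD stageNext cs "QC_PASSED" = "WAITING_TECH_CONTROL_2_1" ∨
    PySem.Dict.getD stageNext cs "QC_PASSED" = "WAITING_TECH_CONTROL_2_2" ∨
    PySem.Dict.getD stageNext cs "QC_PASSED" = "WAITING_PACKING" ∨
    PySem.Dict.getD stageNext cs "QC_PASSED" = "WAITING_ACCOUNTING" ∨
    PySem.Dict.getD stageNext cs "QC_PASSED" = "WAITING_WAREHOUSE" ∨
    PySem.Dict.getD stageNext cs "QC_PASSED" = "QC_PASSED" := by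
  rcases h : PySem.Dict.get? stageNext cs with _ | v
  · rw [PySem.Dict.getD_eq_get?_getD, h]
    tauto
  · have hd : PySem.Dict.getD stageNext cs "QC_PASSED" = v := by
      rw [PySem.Dict.getD_eq_get?_getD, h]; rfl
    have hm : (cs, v) ∈ stageNext.items := PySem.Dict.mem_items_of_get?_eq_some _ h
    rw [hd]
    simp only [stageNext] at hm
    simp at hm
    tauto

lemma both_0 (e : List String) :
    resolveLoop 15 "WAITING_ASSEMBLY" e =
      (if (("WAITING_ASSEMBLY" == "") || !(PySem.Str.startswith "WAITING_ASSEMBLY" "WAITING_")) then "WAITING_ASSEMBLY"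
       else scanStages orderedStages false (PySem.Str.slice "WAITING_ASSEMBLY" (some (PySem.Str.len "WAITING_")) none) e) := by
  rw [if_neg (by decide)]
  rw [show PySem.Str.slice "WAITING_ASSEMBLY" (some (PySem.Str.len "WAITING_")) none = "ASSEMBLY" from by decide]
  rw [show (15:Nat) = 5+10 from by norm_num, loopA_0 e 5]
  simp only [orderedStages]
  rw [scan_hit]
  by_cases h : "ASSEMBLY" ∈ e <;> simp [firstEnabled, h]

lemma both_1 (e : List String) :
    resolveLoop 15 "WAITING_VIBROSTAND" e =
      (if (("WAITING_VIBROSTAND" == "") || !(PySem.Str.startswith "WAITING_VIBROSTAND" "WAITING_")) then "WAITING_VIBROSTAND"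
       else scanStages orderedStages false (PySem.Str.slice "WAITING_VIBROSTAND" (some (PySem.Str.len "WAITING_")) none) e) := by
  rw [if_neg (by decide)]
  rw [show PySem.Str.slice "WAITING_VIBROSTAND" (some (PySem.Str.len "WAITING_")) none = "VIBROSTAND" from by decide]
  rw [show (15:Nat) = 6+9 from by norm_num, loopA_1 e 6]
  simp only [orderedStages]
  rw [scan_skip _ _ _ _ (by decide)]
  rw [scan_hit]
  by_cases h : "VIBROSTAND" ∈ e <;> simp [firstEnabled, h]

lemma both_2 (e : List String) :
    resolveLoop 15 "WAITING_TECH_CONTROL_1_1" e =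
      (if (("WAITING_TECH_CONTROL_1_1" == "") || !(PySem.Str.startswith "WAITING_TECH_CONTROL_1_1" "WAITING_")) then "WAITING_TECH_CONTROL_1_1"
       else scanStages orderedStages false (PySem.Str.slice "WAITING_TECH_CONTROL_1_1" (some (PySem.Str.len "WAITING_")) none) e) := by
  rw [if_neg (by decide)]
  rw [show PySem.Str.slice "WAITING_TECH_CONTROL_1_1" (some (PySem.Str.len "WAITING_")) none = "TECH_CONTROL_1_1" from by decide]
  rw [show (15:Nat) = 7+8 from by norm_num, loopA_2 e 7]
  simp only [orderedStages]
  rw [scan_skip _ _ _ _ (by decide)]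
  rw [scan_skip _ _ _ _ (by decide)]
  rw [scan_hit]
  by_cases h : "TECH_CONTROL_1_1" ∈ e <;> simp [firstEnabled, h]

lemma both_3 (e : List String) :
    resolveLoop 15 "WAITING_TECH_CONTROL_1_2" e =
      (if (("WAITING_TECH_CONTROL_1_2" == "") || !(PySem.Str.startswith "WAITING_TECH_CONTROL_1_2" "WAITING_")) then "WAITING_TECH_CONTROL_1_2"
       else scanStages orderedStages false (PySem.Str.slice "WAITING_TECH_CONTROL_1_2" (some (PySem.Str.len "WAITING_")) none) e) := by
  rw [if_neg (by decide)]
  rw [show PySem.Str.slice "WAITING_TECH_CONTROL_1_2" (some (PySem.Str.len "WAITING_")) none = "TECH_CONTROL_1_2" from by decide]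
  rw [show (15:Nat) = 8+7 from by norm_num, loopA_3 e 8]
  simp only [orderedStages]
  rw [scan_skip _ _ _ _ (by decide)]
  rw [scan_skip _ _ _ _ (by decide)]
  rw [scan_skip _ _ _ _ (by decide)]
  rw [scan_hit]
  by_cases h : "TECH_CONTROL_1_2" ∈ e <;> simp [firstEnabled, h]

lemma both_4 (e : List String) :
    resolveLoop 15 "WAITING_FUNC_CONTROL" e =
      (if (("WAITING_FUNC_CONTROL" == "") || !(PySem.Str.startswith "WAITING_FUNC_CONTROL" "WAITING_")) then "WAITING_FUNC_CONTROL"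
       else scanStages orderedStages false (PySem.Str.slice "WAITING_FUNC_CONTROL" (some (PySem.Str.len "WAITING_")) none) e) := by
  rw [if_neg (by decide)]
  rw [show PySem.Str.slice "WAITING_FUNC_CONTROL" (some (PySem.Str.len "WAITING_")) none = "FUNC_CONTROL" from by decide]
  rw [show (15:Nat) = 9+6 from by norm_num, loopA_4 e 9]
  simp only [orderedStages]
  rw [scan_skip _ _ _ _ (by decide)]
  rw [scan_skip _ _ _ _ (by decide)]
  rw [scan_skip _ _ _ _ (by decide)]
  rw [scan_skip _ _ _ _ (by decide)]
  rw [scan_hit]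
  by_cases h : "FUNC_CONTROL" ∈ e <;> simp [firstEnabled, h]

lemma both_5 (e : List String) :
    resolveLoop 15 "WAITING_TECH_CONTROL_2_1" e =
      (if (("WAITING_TECH_CONTROL_2_1" == "") || !(PySem.Str.startswith "WAITING_TECH_CONTROL_2_1" "WAITING_")) then "WAITING_TECH_CONTROL_2_1"
       else scanStages orderedStages false (PySem.Str.slice "WAITING_TECH_CONTROL_2_1" (some (PySem.Str.len "WAITING_")) none) e) := by
  rw [if_neg (by decide)]
  rw [show PySem.Str.slice "WAITING_TECH_CONTROL_2_1" (some (PySem.Str.len "WAITING_")) none = "TECH_CONTROL_2_1" from by decide]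
  rw [show (15:Nat) = 10+5 from by norm_num, loopA_5 e 10]
  simp only [orderedStages]
  rw [scan_skip _ _ _ _ (by decide)]
  rw [scan_skip _ _ _ _ (by decide)]
  rw [scan_skip _ _ _ _ (by decide)]
  rw [scan_skip _ _ _ _ (by decide)]
  rw [scan_skip _ _ _ _ (by decide)]
  rw [scan_hit]
  by_cases h : "TECH_CONTROL_2_1" ∈ e <;> simp [firstEnabled, h]

lemma both_6 (e : List String) :
    resolveLoop 15 "WAITING_TECH_CONTROL_2_2" e =
      (if (("WAITING_TECH_CONTROL_2_2" == "") || !(PySem.Str.startswith "WAITING_TECH_CONTROL_2_2" "WAITING_")) then "WAITING_TECH_CONTROL_2_2"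
       else scanStages orderedStages false (PySem.Str.slice "WAITING_TECH_CONTROL_2_2" (some (PySem.Str.len "WAITING_")) none) e) := by
  rw [if_neg (by decide)]
  rw [show PySem.Str.slice "WAITING_TECH_CONTROL_2_2" (some (PySem.Str.len "WAITING_")) none = "TECH_CONTROL_2_2" from by decide]
  rw [show (15:Nat) = 11+4 from by norm_num, loopA_6 e 11]
  simp only [orderedStages]
  rw [scan_skip _ _ _ _ (by decide)]
  rw [scan_skip _ _ _ _ (by decide)]
  rw [scan_skip _ _ _ _ (by decide)]
  rw [scan_skip _ _ _ _ (by decide)]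
  rw [scan_skip _ _ _ _ (by decide)]
  rw [scan_skip _ _ _ _ (by decide)]
  rw [scan_hit]
  by_cases h : "TECH_CONTROL_2_2" ∈ e <;> simp [firstEnabled, h]

lemma both_7 (e : List String) :
    resolveLoop 15 "WAITING_PACKING" e =
      (if (("WAITING_PACKING" == "") || !(PySem.Str.startswith "WAITING_PACKING" "WAITING_")) then "WAITING_PACKING"
       else scanStages orderedStages false (PySem.Str.slice "WAITING_PACKING" (some (PySem.Str.len "WAITING_")) none) e) := by
  rw [if_neg (by decide)]
  rw [show PySem.Str.slice "WAITING_PACKING" (some (PySem.Str.len "WAITING_")) none = "PACKING" from by decide]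
  rw [show (15:Nat) = 12+3 from by norm_num, loopA_7 e 12]
  simp only [orderedStages]
  rw [scan_skip _ _ _ _ (by decide)]
  rw [scan_skip _ _ _ _ (by decide)]
  rw [scan_skip _ _ _ _ (by decide)]
  rw [scan_skip _ _ _ _ (by decide)]
  rw [scan_skip _ _ _ _ (by decide)]
  rw [scan_skip _ _ _ _ (by decide)]
  rw [scan_skip _ _ _ _ (by decide)]
  rw [scan_hit]
  by_cases h : "PACKING" ∈ e <;> simp [firstEnabled, h]

lemma both_8 (e : List String) :
    resolveLoop 15 "WAITING_ACCOUNTING" e =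
      (if (("WAITING_ACCOUNTING" == "") || !(PySem.Str.startswith "WAITING_ACCOUNTING" "WAITING_")) then "WAITING_ACCOUNTING"
       else scanStages orderedStages false (PySem.Str.slice "WAITING_ACCOUNTING" (some (PySem.Str.len "WAITING_")) none) e) := by
  rw [if_neg (by decide)]
  rw [show PySem.Str.slice "WAITING_ACCOUNTING" (some (PySem.Str.len "WAITING_")) none = "ACCOUNTING" from by decide]
  rw [show (15:Nat) = 13+2 from by norm_num, loopA_8 e 13]
  simp only [orderedStages]
  rw [scan_skip _ _ _ _ (by decide)]
  rw [scan_skip _ _ _ _ (by decide)]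
  rw [scan_skip _ _ _ _ (by decide)]
  rw [scan_skip _ _ _ _ (by decide)]
  rw [scan_skip _ _ _ _ (by decide)]
  rw [scan_skip _ _ _ _ (by decide)]
  rw [scan_skip _ _ _ _ (by decide)]
  rw [scan_skip _ _ _ _ (by decide)]
  rw [scan_hit]
  by_cases h : "ACCOUNTING" ∈ e <;> simp [firstEnabled, h]

lemma both_9 (e : List String) :
    resolveLoop 15 "WAITING_WAREHOUSE" e =
      (if (("WAITING_WAREHOUSE" == "") || !(PySem.Str.startswith "WAITING_WAREHOUSE" "WAITING_")) then "WAITING_WAREHOUSE"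
       else scanStages orderedStages false (PySem.Str.slice "WAITING_WAREHOUSE" (some (PySem.Str.len "WAITING_")) none) e) := by
  rw [if_neg (by decide)]
  rw [show PySem.Str.slice "WAITING_WAREHOUSE" (some (PySem.Str.len "WAITING_")) none = "WAREHOUSE" from by decide]
  rw [show (15:Nat) = 14+1 from by norm_num, loopA_9 e 14]
  simp only [orderedStages]
  rw [scan_skip _ _ _ _ (by decide)]
  rw [scan_skip _ _ _ _ (by decide)]
  rw [scan_skip _ _ _ _ (by decide)]
  rw [scan_skip _ _ _ _ (by decide)]
  rw [scan_skip _ _ _ _ (by decide)]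
  rw [scan_skip _ _ _ _ (by decide)]
  rw [scan_skip _ _ _ _ (by decide)]
  rw [scan_skip _ _ _ _ (by decide)]
  rw [scan_skip _ _ _ _ (by decide)]
  rw [scan_hit]
  by_cases h : "WAREHOUSE" ∈ e <;> simp [firstEnabled, h]

-- ===== VERDICT (by name: the statement is the Claim_ definition above) =====
theorem resolve_next_status_spec : Claim_equal_resolve_next_status := by
  intro cs es _
  unfold Spec_resolve_next_status resolve_next_status resolve_next_status_alt
  by_cases hes : es = []
  · simp [hes]
  · simp only [if_neg hes]
    rcases getNext_cases cs with h|h|h|h|h|h|h|h|h|h|h <;> rw [h]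
    · exact both_0 es
    · exact both_1 es
    · exact both_2 es
    · exact both_3 es
    · exact both_4 es
    · exact both_5 es
    · exact both_6 es
    · exact both_7 es
    · exact both_8 es
    · exact both_9 es
    · rw [if_pos (by decide)]
      exact loop_qc 15 es
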